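-- pv_equiv track=rewrite | github.com/devdanzin/cpython_fusil_report | gather_issue_data.py | guess_kind_from_labels_title
-- ===== SOURCE A (Python) =====
-- def guess_kind_from_labels_title(labels, title):
--     title_lower = title.lower()
--     label_set = {label.lower() for label in labels}
--     if any(k in title_lower for k in ["segfault", "segmentation fault", "crash"]) or \
--             any(k in label_set for k in ["crash", "segfault"]):
--         return "Segfault/Crash"
--     if "assertionerror" in title_lower or "abort" in title_lower or "assert" in title_lower or \
--             any(k in label_set for k in ["assertionerror", "abort"]):
--         return "Abort/AssertionError"
--     if "systemerror" in title_lower or "system error" in title_lower or \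
--             "systemerror" in label_set:
--         return "SystemError"
--     if "fatal python error" in title_lower or "fatal error" in title_lower or \
--             any(k in label_set for k in ["fatal-error"]):
--         return "Fatal Python Error"
--     return ""
-- ===== SOURCE B (Python) =====
-- _NAMES = ["Segfault/Crash", "Abort/AssertionError", "SystemError", "Fatal Python Error"]
--
-- _TITLE_KW = {"segfault": 0, "segmentation fault": 0, "crash": 0,
--              "assertionerror": 1, "abort": 1, "assert": 1,
--              "systemerror": 2, "system error": 2,
--              "fatal python error": 3, "fatal error": 3}
--
-- _LABEL_KW = {"crash": 0, "segfault": 0, "assertionerror": 1, "abort": 1,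
--              "systemerror": 2, "fatal-error": 3}
--
--
-- def guess_kind_from_labels_title(labels, title):
--     t = title.lower()
--     hits = [p for kw, p in _TITLE_KW.items() if kw in t]
--     hits += [_LABEL_KW[l] for l in (lab.lower() for lab in labels) if l in _LABEL_KW]
--     return _NAMES[min(hits)] if hits else ""
-- ===== Notes on version B (the rewrite author's own statement) =====
-- stated objective: alternative
-- what changed: Instead of an ordered cascade of four rule checks with early return, B flat-maps keyword tables to priority numbers, collects ALL matching priorities from title and labels into one list, and maps the minimum priority back to a category name (empty string if no hits).
import Mathlib
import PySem

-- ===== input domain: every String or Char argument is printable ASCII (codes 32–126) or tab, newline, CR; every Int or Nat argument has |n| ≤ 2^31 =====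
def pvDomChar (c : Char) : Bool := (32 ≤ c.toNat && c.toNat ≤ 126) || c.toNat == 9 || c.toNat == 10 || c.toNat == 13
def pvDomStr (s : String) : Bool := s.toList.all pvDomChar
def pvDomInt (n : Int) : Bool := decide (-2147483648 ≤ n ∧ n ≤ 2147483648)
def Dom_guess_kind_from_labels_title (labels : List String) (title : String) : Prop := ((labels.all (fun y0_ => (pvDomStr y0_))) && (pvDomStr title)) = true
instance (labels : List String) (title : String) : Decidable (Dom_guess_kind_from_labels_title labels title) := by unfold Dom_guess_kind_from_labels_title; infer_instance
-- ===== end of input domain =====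

-- B replaces A's ordered early-return cascade by a different algorithm: it collects ALL
-- matching rule priorities (via flat keyword→priority tables over title and labels) into
-- one list and maps the MINIMUM priority back to a category name (alternative; same cost).

-- ===== PORT A =====
def guess_kind_from_labels_title (labels : List String) (title : String) : String :=
  let title_lower := PySem.Str.lower title
  let label_set := PySem.Set.ofList (labels.map PySem.Str.lower)
  if (["segfault", "segmentation fault", "crash"].any (fun k => PySem.Str.isIn k title_lower)) ||
     (["crash", "segfault"].any (fun k => PySem.Set.contains label_set k)) then
    "Segfault/Crash"
  else if PySem.Str.isIn "assertionerror" title_lower || PySem.Str.isIn "abort" title_lower ||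
          PySem.Str.isIn "assert" title_lower ||
          (["assertionerror", "abort"].any (fun k => PySem.Set.contains label_set k)) then
    "Abort/AssertionError"
  else if PySem.Str.isIn "systemerror" title_lower || PySem.Str.isIn "system error" title_lower ||
          PySem.Set.contains label_set "systemerror" then
    "SystemError"
  else if PySem.Str.isIn "fatal python error" title_lower || PySem.Str.isIn "fatal error" title_lower ||
          (["fatal-error"].any (fun k => PySem.Set.contains label_set k)) then
    "Fatal Python Error"
  else ""

-- ===== PORT B =====
def pvNames : List String := ["Segfault/Crash", "Abort/AssertionError", "SystemError", "Fatal Python Error"]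

def pvTitleKW : List (String × Nat) :=
  [("segfault", 0), ("segmentation fault", 0), ("crash", 0),
   ("assertionerror", 1), ("abort", 1), ("assert", 1),
   ("systemerror", 2), ("system error", 2),
   ("fatal python error", 3), ("fatal error", 3)]

def pvLabelKW : PySem.Dict String Nat :=
  PySem.Dict.mk [("crash", 0), ("segfault", 0), ("assertionerror", 1), ("abort", 1),
                 ("systemerror", 2), ("fatal-error", 3)]

def guess_kind_from_labels_title_alt (labels : List String) (title : String) : String :=
  let t := PySem.Str.lower title
  let hits := pvTitleKW.filterMap (fun kv => if PySem.Str.isIn kv.1 t then some kv.2 else none)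
              ++ (labels.map PySem.Str.lower).filterMap (fun l => PySem.Dict.get? pvLabelKW l)
  match PySem.List.min? hits (fun x => x) with
  | none => ""
  | some p => pvNames.getD p ""   -- _NAMES[min(hits)]; the index is always < 4 (exact)

-- ===== PRECONDITION & SPEC =====
def Spec_guess_kind_from_labels_title (labels : List String) (title : String) (out : String) : Prop := out = guess_kind_from_labels_title_alt labels title
instance (labels : List String) (title : String) (out : String) : Decidable (Spec_guess_kind_from_labels_title labels title out) := by unfold Spec_guess_kind_from_labels_title; infer_instance

-- ===== CLAIM (what is proved, stated in full; the proofs are below) =====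
def Claim_equal_guess_kind_from_labels_title : Prop := ∀ (labels : List String) (title : String), Dom_guess_kind_from_labels_title labels title → Spec_guess_kind_from_labels_title labels title (guess_kind_from_labels_title labels title)

-- ===== LEMMAS AND PROOFS =====
set_option maxHeartbeats 1000000

-- B's full hits list, named for the proofs
def pvHits (labels : List String) (title : String) : List Nat :=
  pvTitleKW.filterMap (fun kv => if PySem.Str.isIn kv.1 (PySem.Str.lower title) then some kv.2 else none)
  ++ (labels.map PySem.Str.lower).filterMap (fun l => PySem.Dict.get? pvLabelKW l)

lemma pvAlt_eq (labels : List String) (title : String) :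
    guess_kind_from_labels_title_alt labels title =
      match PySem.List.min? (pvHits labels title) (fun x => x) with
      | none => ""
      | some p => pvNames.getD p "" := rfl

lemma get?_pvLabelKW (l : String) (p : Nat) :
    PySem.Dict.get? pvLabelKW l = some p ↔
      (l = "crash" ∧ p = 0) ∨ (l = "segfault" ∧ p = 0) ∨ (l = "assertionerror" ∧ p = 1) ∨
      (l = "abort" ∧ p = 1) ∨ (l = "systemerror" ∧ p = 2) ∨ (l = "fatal-error" ∧ p = 3) := by
  simp only [pvLabelKW, PySem.Dict.get?_mk_cons, beq_iff_eq]
  split_ifs <;> simp_all [PySem.Dict.get?, eq_comm]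

lemma pvHits_lt4 (labels : List String) (title : String) :
    ∀ p ∈ pvHits labels title, p < 4 := by
  intro p hp
  unfold pvHits at hp
  rcases List.mem_append.1 hp with h | h
  · rcases List.mem_filterMap.1 h with ⟨kv, hkv, he⟩
    fin_cases hkv <;> split at he <;> simp_all <;> omega
  · rcases List.mem_filterMap.1 h with ⟨l, _, he⟩
    rcases (get?_pvLabelKW l p).1 he with ⟨_, h⟩ | ⟨_, h⟩ | ⟨_, h⟩ | ⟨_, h⟩ | ⟨_, h⟩ | ⟨_, h⟩ <;> omega

lemma pv_min_char (hits : List Nat) (h4 : ∀ x ∈ hits, x < 4) :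
    PySem.List.min? hits (fun x => x) =
      if 0 ∈ hits then some 0 else if 1 ∈ hits then some 1
      else if 2 ∈ hits then some 2 else if 3 ∈ hits then some 3 else none := by
  rcases hits with _ | ⟨a, t⟩
  · simp [PySem.List.min?]
  · obtain ⟨m, hm⟩ : ∃ m, PySem.List.min? (a :: t) (fun x => x) = some m :=
      ⟨_, PySem.List.min?_id_cons a t⟩
    have hmem := PySem.List.min?_mem hm
    have hmin := PySem.List.min?_isMin hm
    have hm4 := h4 m hmem
    rw [hm]
    split_ifs with h0 h1 h2 h3
    · have := hmin 0 h0
      simp only [Option.some.injEq]; omega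
    · have := hmin 1 h1
      have : m ≠ 0 := fun e => h0 (e ▸ hmem)
      simp only [Option.some.injEq]; omega
    · have := hmin 2 h2
      have : m ≠ 0 := fun e => h0 (e ▸ hmem)
      have : m ≠ 1 := fun e => h1 (e ▸ hmem)
      simp only [Option.some.injEq]; omega
    · have := hmin 3 h3
      have : m ≠ 0 := fun e => h0 (e ▸ hmem)
      have : m ≠ 1 := fun e => h1 (e ▸ hmem)
      have : m ≠ 2 := fun e => h2 (e ▸ hmem)
      simp only [Option.some.injEq]; omega
    · exfalso
      interval_cases m <;> [exact h0 hmem; exact h1 hmem; exact h2 hmem; exact h3 hmem]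

-- each rule condition of A fires exactly when its priority is a hit of B
lemma pvKey0 (labels : List String) (title : String) :
    ((["segfault", "segmentation fault", "crash"].any (fun k => PySem.Str.isIn k (PySem.Str.lower title))) ||
     (["crash", "segfault"].any (fun k => PySem.Set.contains (PySem.Set.ofList (labels.map PySem.Str.lower)) k))) = true
    ↔ 0 ∈ pvHits labels title := by
  simp [pvHits, pvTitleKW, List.mem_filterMap, get?_pvLabelKW, PySem.Set.mem_ofList,
        and_or_left, exists_or, or_assoc]

lemma pvKey1 (labels : List String) (title : String) :
    (PySem.Str.isIn "assertionerror" (PySem.Str.lower title) || PySem.Str.isIn "abort" (PySem.Str.lower title) ||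
     PySem.Str.isIn "assert" (PySem.Str.lower title) ||
     (["assertionerror", "abort"].any (fun k => PySem.Set.contains (PySem.Set.ofList (labels.map PySem.Str.lower)) k))) = true
    ↔ 1 ∈ pvHits labels title := by
  simp [pvHits, pvTitleKW, List.mem_filterMap, get?_pvLabelKW, PySem.Set.mem_ofList,
        and_or_left, exists_or, or_assoc]

lemma pvKey2 (labels : List String) (title : String) :
    (PySem.Str.isIn "systemerror" (PySem.Str.lower title) || PySem.Str.isIn "system error" (PySem.Str.lower title) ||
     PySem.Set.contains (PySem.Set.ofList (labels.map PySem.Str.lower)) "systemerror") = true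
    ↔ 2 ∈ pvHits labels title := by
  simp [pvHits, pvTitleKW, List.mem_filterMap, get?_pvLabelKW, PySem.Set.mem_ofList, or_assoc]

lemma pvKey3 (labels : List String) (title : String) :
    (PySem.Str.isIn "fatal python error" (PySem.Str.lower title) || PySem.Str.isIn "fatal error" (PySem.Str.lower title) ||
     (["fatal-error"].any (fun k => PySem.Set.contains (PySem.Set.ofList (labels.map PySem.Str.lower)) k))) = true
    ↔ 3 ∈ pvHits labels title := by
  simp [pvHits, pvTitleKW, List.mem_filterMap, get?_pvLabelKW, PySem.Set.mem_ofList, or_assoc]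

-- ===== VERDICT (by name: the statement is the Claim_ definition above) =====
theorem guess_kind_from_labels_title_spec : Claim_equal_guess_kind_from_labels_title := by
  intro labels title _
  unfold Spec_guess_kind_from_labels_title
  rw [pvAlt_eq, pv_min_char _ (pvHits_lt4 labels title)]
  simp only [guess_kind_from_labels_title, pvKey0 labels title, pvKey1 labels title,
             pvKey2 labels title, pvKey3 labels title]
  by_cases h0 : 0 ∈ pvHits labels title <;>
  by_cases h1 : 1 ∈ pvHits labels title <;>
  by_cases h2 : 2 ∈ pvHits labels title <;>
  by_cases h3 : 3 ∈ pvHits labels title <;>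
  simp [h0, h1, h2, h3, pvNames]
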